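-- pv_equiv track=rewrite | github.com/Prateekkumar-DEV/Questions | string.py | aplha_true
-- ===== SOURCE A (Python) =====
-- alpha = ['C','O','K','F']
--
-- def aplha_true(s):
--     case_1 = False
--     for i in s:
--         if i not in alpha:
--             case_1 = False
--         else:
--             case_1 = True
--     return case_1
-- ===== SOURCE B (Python) =====
-- alpha = ['C','O','K','F']
--
-- def aplha_true(s):
--     # Only the last character decides: the loop flag in A is overwritten each pass.
--     return bool(s) and s[-1] in alpha
-- ===== Notes on version B (the rewrite author's own statement) =====
-- stated objective: simpler
-- what changed: Replaces the whole-string loop whose flag is overwritten each iteration by a direct test of the last character (empty string gives False).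
import Mathlib
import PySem

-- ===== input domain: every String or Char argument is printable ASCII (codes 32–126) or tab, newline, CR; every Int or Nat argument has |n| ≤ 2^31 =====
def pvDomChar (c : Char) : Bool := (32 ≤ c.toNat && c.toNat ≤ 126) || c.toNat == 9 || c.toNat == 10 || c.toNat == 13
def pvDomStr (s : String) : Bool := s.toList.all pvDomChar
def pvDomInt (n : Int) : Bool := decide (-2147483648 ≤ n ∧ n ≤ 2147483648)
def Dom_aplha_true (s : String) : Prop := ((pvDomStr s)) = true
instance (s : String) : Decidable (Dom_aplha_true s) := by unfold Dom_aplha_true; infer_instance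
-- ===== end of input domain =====

-- B replaces A's loop (whose flag is overwritten each pass) by a direct test of the last character: simpler, O(1) after taking the character list.

def pvAlpha : List Char := ['C', 'O', 'K', 'F']

-- ===== PORT A =====
-- literal transliteration: fold over the characters, flag overwritten each step
def aplha_true (s : String) : Bool :=
  s.toList.foldl (fun case_1 i => if ¬ (pvAlpha.contains i) then false else true) false

-- ===== PORT B =====
-- literal transliteration of Source B: bool(s) and s[-1] in alpha
def aplha_true_alt (s : String) : Bool :=
  match s.toList.getLast? with
  | none => false
  | some c => pvAlpha.contains c

-- ===== PRECONDITION & SPEC =====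
def Spec_aplha_true (s : String) (out : Bool) : Prop := out = aplha_true_alt s
instance (s : String) (out : Bool) : Decidable (Spec_aplha_true s out) := by unfold Spec_aplha_true; infer_instance

-- ===== CLAIM (what is proved, stated in full; the proofs are below) =====
def Claim_equal_aplha_true : Prop := ∀ (s : String), Dom_aplha_true s → Spec_aplha_true s (aplha_true s)

-- ===== LEMMAS AND PROOFS =====
-- A fold whose step ignores the accumulator returns the function of the last element.
theorem foldl_last (l : List Char) (b : Bool) (g : Char → Bool) :
    l.foldl (fun _ i => g i) b = match l.getLast? with | none => b | some c => g c := by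
  induction l generalizing b with
  | nil => simp
  | cons x xs ih =>
    cases xs with
    | nil => simp [List.foldl]
    | cons y ys => simpa [List.foldl] using ih (g x)

-- ===== VERDICT (by name: the statement is the Claim_ definition above) =====
theorem aplha_true_spec : Claim_equal_aplha_true := by
  intro s _
  unfold Spec_aplha_true aplha_true aplha_true_alt
  rw [foldl_last]
  cases s.toList.getLast? <;> simp
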